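-- pv_equiv track=rewrite | github.com/Janeho454199/my_leetcode | 力扣周赛/308/6161-从字符串中移除星号.py | removeStars2
-- ===== SOURCE A (Python) =====
-- def removeStars2(s: str) -> str:
--     """
--     思路：栈一次遍历（ac）
--     """
--     stack = []
--     for i in s:
--         if i != '*':
--             stack.append(i)
--         else:
--             stack.pop(-1)
--
--     return ''.join(stack)
-- ===== SOURCE B (Python) =====
-- def removeStars2(s: str) -> str:
--     skip = 0
--     out = []
--     for c in reversed(s):
--         if c == '*':
--             skip += 1
--         elif skip:
--             skip -= 1
--         else:
--             out.append(c)
--     return ''.join(reversed(out))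
-- ===== Notes on version B (the rewrite author's own statement) =====
-- stated objective: alternative
-- what changed: Replaces the explicit character stack with a single right-to-left scan keeping an integer skip counter of pending stars, so no stack is ever built or popped.
-- outside the precondition, e.g. on removeStars2('*'): A raises IndexError, B returns ''
import Mathlib
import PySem

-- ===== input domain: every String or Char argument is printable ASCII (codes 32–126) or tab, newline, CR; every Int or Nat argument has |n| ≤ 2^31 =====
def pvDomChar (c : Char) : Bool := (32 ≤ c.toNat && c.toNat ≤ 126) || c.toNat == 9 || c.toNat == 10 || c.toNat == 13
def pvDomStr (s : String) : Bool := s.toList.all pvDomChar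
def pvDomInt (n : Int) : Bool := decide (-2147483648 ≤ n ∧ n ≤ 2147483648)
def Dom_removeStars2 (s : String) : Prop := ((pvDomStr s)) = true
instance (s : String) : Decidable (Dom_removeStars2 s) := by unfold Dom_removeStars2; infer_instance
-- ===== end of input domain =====

-- B replaces A's explicit stack (append/pop) by a single right-to-left scan with an
-- integer counter of pending stars; a genuinely different data structure, same O(n) cost.

-- ===== PORT A =====
-- A's loop: push non-'*', pop(-1) on '*'; none models the IndexError of pop on empty stack.
def afoldA : List Char → List Char → Option (List Char)
  | st, [] => some st
  | st, c :: rest =>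
      if c ≠ '*' then afoldA (st ++ [c]) rest
      else match st with
        | [] => none
        | _ :: _ => afoldA st.dropLast rest

def removeStars2 (s : String) : String :=
  match afoldA [] s.toList with
  | some st => String.ofList st
  | none => ""   -- unreachable under Pre_ (A raises IndexError there)

-- ===== PORT B =====
-- B's loop over reversed(s): count stars in skip, keep a char only when skip = 0.
def brunB : List Char → Nat → List Char → List Char
  | [], _, acc => acc
  | c :: rest, skip, acc =>
      if c = '*' then brunB rest (skip + 1) acc
      else if skip > 0 then brunB rest (skip - 1) acc
      else brunB rest 0 (c :: acc)

def removeStars2_alt (s : String) : String :=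
  String.ofList (brunB s.toList.reverse 0 [])

-- ===== PRECONDITION & SPEC =====
-- Pre_ excludes exactly the strings on which A raises IndexError (some prefix holds
-- more '*' than preceding non-deleted characters); B returns a value there.
def Pre_removeStars2 (s : String) : Prop :=
  ∀ i ∈ List.range (s.toList.length + 1), 2 * ((s.toList.take i).count '*') ≤ i
instance (s : String) : Decidable (Pre_removeStars2 s) := by unfold Pre_removeStars2; infer_instance

def pvWitness_removeStars2 : String := "ab*c*d"

def Spec_removeStars2 (s : String) (out : String) : Prop := out = removeStars2_alt s
instance (s : String) (out : String) : Decidable (Spec_removeStars2 s out) := by unfold Spec_removeStars2; infer_instance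

-- ===== CLAIM (what is proved, stated in full; the proofs are below) =====
def Claim_equal_removeStars2 : Prop := ∀ (s : String), Dom_removeStars2 s → Pre_removeStars2 s → Spec_removeStars2 s (removeStars2 s)

-- ===== LEMMAS AND PROOFS =====

/-- A never underflows when every prefix has stars bounded by the initial stack plus
the preceding non-star characters. -/
lemma afoldA_total (xs : List Char) : ∀ (st : List Char),
    (∀ i, i ≤ xs.length → 2 * ((xs.take i).count '*') ≤ st.length + i) →
    ∃ res, afoldA st xs = some res := by
  induction xs with
  | nil => intro st _; exact ⟨st, rfl⟩
  | cons c rest ih =>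
    intro st h
    by_cases hc : c = '*'
    · subst hc
      have h1 := h 1 (by simp)
      simp at h1
      match st with
      | [] => simp at h1
      | a :: st' =>
        obtain ⟨res, hres⟩ := ih ((a :: st').dropLast) (by
          intro i hi
          have h2 := h (i + 1) (by simp; omega)
          simp at h2 ⊢
          omega)
        exact ⟨res, by simpa [afoldA] using hres⟩
    · obtain ⟨res, hres⟩ := ih (st ++ [c]) (by
        intro i hi
        have h2 := h (i + 1) (by simp; omega)
        simp [hc] at h2 ⊢
        omega)
      exact ⟨res, by simpa [afoldA, hc] using hres⟩

lemma afoldA_snoc (ys : List Char) (c : Char) : ∀ st,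
    afoldA st (ys ++ [c]) = (afoldA st ys).bind (fun r =>
      if c ≠ '*' then some (r ++ [c])
      else match r with | [] => none | _ :: _ => some r.dropLast) := by
  induction ys with
  | nil =>
    intro st
    by_cases hc : c = '*'
    · subst hc
      match st with
      | [] => simp [afoldA]
      | a :: st' => simp [afoldA]
    · simp [afoldA, hc]
  | cons d rest ih =>
    intro st
    by_cases hd : d = '*'
    · subst hd
      match st with
      | [] => simp [afoldA]
      | a :: st' => simpa [afoldA] using ih ((a :: st').dropLast)
    · simpa [afoldA, hd] using ih (st ++ [d])

/-- B's reverse scan with pending skip count computes A's stack with its last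
`skip` elements removed. -/
lemma brunB_eq (xs : List Char) : ∀ res, afoldA [] xs = some res →
    ∀ skip acc, skip ≤ res.length →
    brunB xs.reverse skip acc = res.take (res.length - skip) ++ acc := by
  induction xs using List.reverseRecOn with
  | nil =>
    intro res hres skip acc hskip
    simp [afoldA] at hres
    subst hres
    simp at hskip
    simp [brunB, hskip]
  | append_singleton ys c ih =>
    intro res hres skip acc hskip
    rw [afoldA_snoc] at hres
    cases hr : afoldA [] ys with
    | none => rw [hr] at hres; simp at hres
    | some r =>
      rw [hr] at hres
      simp only [Option.bind_some] at hres
      rw [List.reverse_append, List.reverse_singleton, List.singleton_append]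
      by_cases hc : c = '*'
      · subst hc
        simp only [ne_eq, not_true_eq_false, if_false] at hres
        match r, hres with
        | a :: r', hres =>
          have hres' : res = (a :: r').dropLast := (Option.some.inj hres).symm
          have h2 := ih (a :: r') hr (skip + 1) acc (by
            have : res.length = r'.length := by rw [hres']; simp
            simp; omega)
          rw [show brunB ('*' :: ys.reverse) skip acc = brunB ys.reverse (skip + 1) acc
              from by simp [brunB]]
          rw [h2, hres']
          rw [List.dropLast_eq_take, List.take_take]
          congr 2
          simp only [List.length_cons, List.length_take]
          omega
      · simp only [ne_eq, hc, not_false_eq_true, if_true] at hres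
        have hres' : res = r ++ [c] := (Option.some.inj hres).symm
        subst hres'
        match skip with
        | 0 =>
          have h2 := ih r hr 0 (c :: acc) (Nat.zero_le _)
          rw [show brunB (c :: ys.reverse) 0 acc = brunB ys.reverse 0 (c :: acc)
              from by simp [brunB, hc]]
          rw [h2, Nat.sub_zero, Nat.sub_zero, List.take_length, List.take_length,
              List.append_assoc]
          simp
        | k + 1 =>
          simp only [List.length_append, List.length_cons, List.length_nil] at hskip
          have h2 := ih r hr k acc (by omega)
          rw [show brunB (c :: ys.reverse) (k + 1) acc = brunB ys.reverse k acc
              from by simp [brunB, hc]]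
          rw [h2]
          congr 1
          have he : (r ++ [c]).length - (k + 1) = r.length - k := by simp
          rw [he, List.take_append_of_le_length (l₂ := [c]) (Nat.sub_le r.length k)]

-- ===== VERDICT (by name: the statement is the Claim_ definition above) =====
theorem removeStars2_spec : Claim_equal_removeStars2 := by
  intro s _ hpre
  unfold Spec_removeStars2 removeStars2 removeStars2_alt
  have hpre' : ∀ i, i ≤ s.toList.length → 2 * ((s.toList.take i).count '*') ≤ ([] : List Char).length + i := by
    intro i hi
    simpa using hpre i (List.mem_range.mpr (by omega))
  obtain ⟨res, hres⟩ := afoldA_total s.toList [] hpre'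
  rw [hres]
  rw [brunB_eq s.toList res hres 0 [] (Nat.zero_le _)]
  simp
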